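-- pv_equiv track=rewrite | github.com/pypi-data/pypi-mirror-26 | packages/topiceval/topiceval-2.4.5.dev1.tar.gz/topiceval-2.4.5.dev1/topiceval/usereval/task_evaluation.py | folder_task_data_split
-- ===== SOURCE A (Python) =====
-- def folder_task_data_split(X, y):
--     test_split = 0.25
--
--     X_train, X_test, y_train, y_test = [], [], [], []
--     if len(y) == 0:
--         return X_train, X_test, y_train, y_test
--
--     current_folder = y[0]
--     current_idc = [0]
--     itr = 1
--     while True:
--         while itr < len(y) and y[itr] == current_folder:
--             current_idc.append(itr)
--             itr += 1
--         X_train += [X[idx] for idx in current_idc[int(test_split * len(current_idc)):]]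
--         X_test += [X[idx] for idx in current_idc[:int(test_split * len(current_idc))]]
--         y_train += [current_folder] * (len(current_idc) - int(test_split * len(current_idc)))
--         y_test += [current_folder] * int(test_split * len(current_idc))
--         if itr == len(y):
--             break
--         else:
--             current_folder = y[itr]
--             current_idc = []
--     return X_train, X_test, y_train, y_test
-- ===== SOURCE B (Python) =====
-- def folder_task_data_split(X, y):
--     test_split = 0.25
--     # Phase 1: run-length encode consecutive folder labels of y.
--     runs = []
--     for lab in y:
--         if runs and runs[-1][0] == lab:
--             runs[-1] = (lab, runs[-1][1] + 1)
--         else: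
--             runs.append((lab, 1))
--     # Phase 2: each run occupies a contiguous block of X; slice it directly.
--     X_train, X_test, y_train, y_test = [], [], [], []
--     start = 0
--     for lab, n in runs:
--         cut = int(test_split * n)
--         X_test += X[start:start + cut]
--         X_train += X[start + cut:start + n]
--         y_test += [lab] * cut
--         y_train += [lab] * (n - cut)
--         start += n
--     return X_train, X_test, y_train, y_test
-- ===== Notes on version B (the rewrite author's own statement) =====
-- stated objective: simpler
-- what changed: Replaces the manual while-True/inner-while pointer scan that builds per-run index lists with a two-phase pass: run-length encode the consecutive folder labels of y, then cut each run's contiguous block of X with direct slices.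
-- outside the precondition, e.g. on folder_task_data_split([], ['a']): A raises IndexError, B returns ([], [], ['a'], [])
import Mathlib
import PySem

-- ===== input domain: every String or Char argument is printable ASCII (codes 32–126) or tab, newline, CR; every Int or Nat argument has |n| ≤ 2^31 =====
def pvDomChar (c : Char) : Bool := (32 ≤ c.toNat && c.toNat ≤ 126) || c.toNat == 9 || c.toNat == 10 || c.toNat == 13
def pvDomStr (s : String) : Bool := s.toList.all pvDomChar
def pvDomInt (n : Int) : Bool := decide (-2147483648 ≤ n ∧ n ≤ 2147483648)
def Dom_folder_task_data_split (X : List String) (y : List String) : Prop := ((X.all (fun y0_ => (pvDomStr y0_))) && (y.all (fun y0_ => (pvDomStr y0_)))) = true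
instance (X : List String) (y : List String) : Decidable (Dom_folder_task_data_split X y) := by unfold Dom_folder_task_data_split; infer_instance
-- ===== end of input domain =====

-- B re-implements the split in two phases (run-length encode y, then slice X per run)
-- instead of A's manual pointer scan with index lists; objective: simpler. Equivalence is
-- about the return value; neither program mutates its arguments.

-- ===== PORT A =====
-- inner `while itr < len(y) and y[itr] == current_folder` loop
def innerA (y : List String) (folder : String) (itr : Nat) (idc : List Nat) : List Nat × Nat :=
  if h : itr < y.length ∧ (y.getD itr "" == folder) = true then
    innerA y folder (itr + 1) (idc ++ [itr])
  else (idc, itr)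
termination_by y.length - itr
decreasing_by obtain ⟨h1, _⟩ := h; omega

-- outer `while True` loop; fuel = len(y) suffices (each iteration consumes one run, and
-- there are at most len(y) runs), so the fuel-0 branch is never reached on real runs.
-- `int(0.25 * n)` is ported as `n / 4`: `0.25 * n` is exact in floating point.
-- `X[idx]` is ported as `X.getD idx ""`; under Pre_ every idx is in range, so this is exact.
def outerA (X y : List String) (fuel : Nat) (folder : String) (idc0 : List Nat) (itr0 : Nat)
    (acc : List String × List String × List String × List String) :
    List String × List String × List String × List String :=
  let p := innerA y folder itr0 idc0
  let idc := p.1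
  let itr := p.2
  let cut := idc.length / 4
  let acc1 := (acc.1 ++ (idc.drop cut).map (fun i => X.getD i ""),
               acc.2.1 ++ (idc.take cut).map (fun i => X.getD i ""),
               acc.2.2.1 ++ List.replicate (idc.length - cut) folder,
               acc.2.2.2 ++ List.replicate cut folder)
  if itr = y.length then acc1
  else match fuel with
    | 0 => acc1
    | fuel + 1 => outerA X y fuel (y.getD itr "") [] itr acc1

def folder_task_data_split (X : List String) (y : List String) : List String × List String × List String × List String :=
  if y.length = 0 then ([], [], [], [])
  else outerA X y y.length (y.getD 0 "") [0] 1 ([], [], [], [])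

-- ===== PORT B =====
-- phase 1: run-length encoding step (`runs[-1] = (lab, runs[-1][1]+1)` or append)
def runStepB (acc : List (String × Nat)) (lab : String) : List (String × Nat) :=
  match acc.getLast? with
  | some (l, n) => if l == lab then acc.dropLast ++ [(lab, n + 1)] else acc ++ [(lab, 1)]
  | none => [(lab, 1)]

-- phase 2 step; state = (start, X_train, X_test, y_train, y_test).
-- Python slices X[a:b] (0 ≤ a ≤ b) are exactly (X.drop a).take (b-a), incl. clamping.
-- `int(0.25 * n)` ported as `n / 4` (exact float product).
def stepB (X : List String) (st : Nat × List String × List String × List String × List String)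
    (r : String × Nat) : Nat × List String × List String × List String × List String :=
  let start := st.1
  let lab := r.1
  let n := r.2
  let cut := n / 4
  (start + n,
   st.2.1 ++ (X.drop (start + cut)).take (n - cut),
   st.2.2.1 ++ (X.drop start).take cut,
   st.2.2.2.1 ++ List.replicate (n - cut) lab,
   st.2.2.2.2 ++ List.replicate cut lab)

def folder_task_data_split_alt (X : List String) (y : List String) : List String × List String × List String × List String :=
  (List.foldl (stepB X) (0, [], [], [], []) (y.foldl runStepB [])).2

-- ===== PRECONDITION & SPEC =====
-- A indexes X at every position 0..len(y)-1, so it raises IndexError iff y ≠ [] and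
-- len(X) < len(y); exactly those inputs are excluded.
def Pre_folder_task_data_split (X : List String) (y : List String) : Prop :=
  y = [] ∨ y.length ≤ X.length
instance (X : List String) (y : List String) : Decidable (Pre_folder_task_data_split X y) := by
  unfold Pre_folder_task_data_split; infer_instance

def pvWitness_folder_task_data_split : List String × List String :=
  (["a", "b", "c", "d", "e"], ["u", "u", "u", "u", "v"])

def Spec_folder_task_data_split (X : List String) (y : List String) (out : List String × List String × List String × List String) : Prop := out = folder_task_data_split_alt X y
instance (X : List String) (y : List String) (out : List String × List String × List String × List String) : Decidable (Spec_folder_task_data_split X y out) := by unfold Spec_folder_task_data_split; infer_instance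

-- ===== CLAIM (what is proved, stated in full; the proofs are below) =====
def Claim_equal_folder_task_data_split : Prop := ∀ (X : List String) (y : List String), Dom_folder_task_data_split X y → Pre_folder_task_data_split X y → Spec_folder_task_data_split X y (folder_task_data_split X y)

-- ===== LEMMAS AND PROOFS =====

-- length of the leading run of `f` in `l`
def runLen (f : String) (l : List String) : Nat := (l.takeWhile (fun s => s == f)).length

-- the four output pieces contributed by one run (B's slice form)
def piece (X : List String) (start n : Nat) (lab : String)
    (acc : List String × List String × List String × List String) :
    List String × List String × List String × List String :=
  (acc.1 ++ (X.drop (start + n / 4)).take (n - n / 4),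
   acc.2.1 ++ (X.drop start).take (n / 4),
   acc.2.2.1 ++ List.replicate (n - n / 4) lab,
   acc.2.2.2 ++ List.replicate (n / 4) lab)

-- common reference: process the remaining labels run by run
def S (X : List String) : List String → Nat → (List String × List String × List String × List String) → (List String × List String × List String × List String)
  | [], _, acc => acc
  | a :: l, start, acc =>
      S X (l.drop (runLen a l)) (start + (runLen a l + 1)) (piece X start (runLen a l + 1) a acc)
termination_by l => l.length
decreasing_by simp [List.length_drop]

-- structural run-length decomposition
def runsOf : List String → List (String × Nat)
  | [] => []
  | a :: l => (a, runLen a l + 1) :: runsOf (l.drop (runLen a l))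
termination_by l => l.length
decreasing_by simp [List.length_drop]

theorem runLen_le (f : String) (l : List String) : runLen f l ≤ l.length := by
  induction l with
  | nil => simp [runLen]
  | cons a l ih =>
      by_cases h : (a == f) = true <;> simp [runLen, h] <;> simpa [runLen] using ih

theorem runLen_cons_pos (f a : String) (l : List String) (h : (a == f) = true) :
    runLen f (a :: l) = runLen f l + 1 := by
  simp [runLen, h]

theorem runLen_cons_neg (f a : String) (l : List String) (h : (a == f) = false) :
    runLen f (a :: l) = 0 := by
  simp [runLen, h]

theorem range'_drop : ∀ (k s m : Nat), (List.range' s m).drop k = List.range' (s + k) (m - k) := by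
  intro k
  induction k with
  | zero => simp
  | succ k ih =>
      intro s m
      cases m with
      | zero => simp
      | succ m => rw [List.range'_succ, List.drop_succ_cons, ih]; congr 1 <;> omega

theorem range'_take : ∀ (k s m : Nat), k ≤ m → (List.range' s m).take k = List.range' s k := by
  intro k
  induction k with
  | zero => simp
  | succ k ih =>
      intro s m hk
      cases m with
      | zero => omega
      | succ m =>
          rw [List.range'_succ, List.take_succ_cons, List.range'_succ, ih (s + 1) m (by omega)]

theorem map_getD_range' (X : List String) : ∀ (m s : Nat), s + m ≤ X.length →
    (List.range' s m).map (fun i => X.getD i "") = (X.drop s).take m := by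
  intro m
  induction m with
  | zero => simp
  | succ m ih =>
      intro s hs
      have hlt : s < X.length := by omega
      rw [List.range'_succ, List.map_cons, List.drop_eq_getElem_cons hlt,
          List.take_succ_cons, ih (s + 1) (by omega)]
      simp [List.getD_eq_getElem?_getD, List.getElem?_eq_getElem hlt]

theorem inner_spec (y : List String) (f : String) (itr : Nat) (idc : List Nat) :
    innerA y f itr idc = (idc ++ List.range' itr (runLen f (y.drop itr)), itr + runLen f (y.drop itr)) := by
  fun_induction innerA y f itr idc with
  | case1 itr idc h ih =>
      obtain ⟨h1, h2⟩ := h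
      have hd : y.drop itr = y[itr] :: y.drop (itr + 1) := List.drop_eq_getElem_cons h1
      have hg : y.getD itr "" = y[itr] := by
        simp [List.getD_eq_getElem?_getD, List.getElem?_eq_getElem h1]
      rw [ih, hd, runLen_cons_pos f _ _ (by rw [← hg]; exact h2)]
      rw [List.range'_succ]
      refine Prod.ext ?_ ?_
      · simp
      · simp; omega
  | case2 itr idc h =>
      rcases Nat.lt_or_ge itr y.length with hlt | hge
      · have hd : y.drop itr = y[itr] :: y.drop (itr + 1) := List.drop_eq_getElem_cons hlt
        have hg : y.getD itr "" = y[itr] := by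
          simp [List.getD_eq_getElem?_getD, List.getElem?_eq_getElem hlt]
        have hbeq : (y[itr] == f) = false := by
          by_cases hb : (y.getD itr "" == f) = true
          · exact absurd ⟨hlt, hb⟩ h
          · rw [← hg]; simpa using hb
        rw [hd, runLen_cons_neg f _ _ hbeq]
        simp
      · rw [List.drop_eq_nil_of_le hge]
        simp [runLen]

theorem outer_eq_S (X y : List String) (hXy : y.length ≤ X.length) :
    ∀ (fuel start m : Nat) (acc : List String × List String × List String × List String),
    m ≤ 1 → start + m ≤ y.length → start < y.length → y.length - start ≤ fuel →
    outerA X y fuel (y.getD start "") (List.range' start m) (start + m) acc = S X (y.drop start) start acc := by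
  intro fuel
  induction fuel with
  | zero => intro start m acc _ _ h3 h4; omega
  | succ fuel ih =>
      intro start m acc hm h2 h3 h4
      have hd : y.drop start = y[start] :: y.drop (start + 1) := List.drop_eq_getElem_cons h3
      have hg : y.getD start "" = y[start] := by
        simp [List.getD_eq_getElem?_getD, List.getElem?_eq_getElem h3]
      have hK : runLen (y.getD start "") (y.drop (start + m)) + m
          = runLen y[start] (y.drop (start + 1)) + 1 := by
        interval_cases m
        · simp only [Nat.add_zero]
          rw [hg, hd, runLen_cons_pos _ _ _ (by simp)]
        · rw [hg]
      set kk := runLen y[start] (y.drop (start + 1)) with hkk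
      have hkkle : kk ≤ y.length - (start + 1) := by
        have := runLen_le y[start] (y.drop (start + 1))
        simpa using this
      have hrun : start + kk + 1 ≤ y.length := by omega
      rw [outerA]
      rw [inner_spec]
      simp only [List.range'_append_1]
      have hm' : m + runLen (y.getD start "") (y.drop (start + m)) = kk + 1 := by omega
      rw [hm']
      have hitr : start + m + runLen (y.getD start "") (y.drop (start + m)) = start + (kk + 1) := by omega
      rw [hitr]
      have hcut : (kk + 1) / 4 ≤ kk + 1 := Nat.div_le_self _ _
      have hlen : (List.range' start (kk + 1)).length = kk + 1 := List.length_range'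
      rw [hlen, range'_drop, range'_take _ _ _ hcut,
          map_getD_range' X _ _ (by omega), map_getD_range' X _ _ (by omega)]
      have hSeq : S X (y.drop start) start acc
          = S X (y.drop (start + (kk + 1))) (start + (kk + 1)) (piece X start (kk + 1) y[start] acc) := by
        rw [hd, S]
        congr 1
        · rw [List.drop_drop]; congr 1; omega
      rw [hSeq, hg]
      by_cases hend : start + (kk + 1) = y.length
      · simp only [if_pos hend, piece]
        rw [show List.drop (start + (kk + 1)) y = [] from List.drop_eq_nil_of_le (by omega), S]
      · simp only [if_neg hend]
        have := ih (start + (kk + 1)) 0 (piece X start (kk + 1) y[start] acc)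
          (by omega) (by omega) (by omega) (by omega)
        simpa [piece] using this

theorem runsOf_cons (a : String) (l : List String) :
    runsOf (a :: l) = (a, runLen a l + 1) :: runsOf (l.drop (runLen a l)) := by
  rw [runsOf]

theorem runsB_aux (l : List String) : ∀ (rs : List (String × Nat)) (f : String) (n : Nat),
    List.foldl runStepB (rs ++ [(f, n)]) l
      = rs ++ (f, n + runLen f l) :: runsOf (l.drop (runLen f l)) := by
  induction l with
  | nil => intro rs f n; simp [runLen, runsOf]
  | cons a l ih =>
      intro rs f n
      rw [List.foldl_cons]
      have hstep : runStepB (rs ++ [(f, n)]) a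
          = if (f == a) = true then rs ++ [(a, n + 1)] else (rs ++ [(f, n)]) ++ [(a, 1)] := by
        simp [runStepB]
      by_cases hfa : (f == a) = true
      · rw [hstep, if_pos hfa]
        have hf : f = a := eq_of_beq hfa
        subst hf
        have harith : n + (runLen f l + 1) = n + 1 + runLen f l := by omega
        rw [ih rs f (n + 1), runLen_cons_pos f f l (by simp), List.drop_succ_cons, harith]
      · rw [hstep, if_neg hfa]
        have haf : (a == f) = false := by
          by_cases hb : a = f
          · subst hb; exact absurd (by simp) hfa
          · simpa using hb
        rw [ih (rs ++ [(f, n)]) a 1, runLen_cons_neg f a l haf]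
        simp only [Nat.add_zero, List.drop_zero]
        rw [runsOf_cons]
        simp [Nat.add_comm]

theorem runsB_eq (y : List String) : y.foldl runStepB [] = runsOf y := by
  cases y with
  | nil => simp [runsOf]
  | cons a l =>
      rw [List.foldl_cons]
      have h0 : runStepB [] a = [] ++ [(a, 1)] := by simp [runStepB]
      rw [h0, runsB_aux l [] a 1, runsOf_cons]
      simp [Nat.add_comm]

theorem foldB_eq_S (X : List String) (l : List String) : ∀ (start : Nat)
    (acc : List String × List String × List String × List String),
    List.foldl (stepB X) (start, acc) (runsOf l) = (start + l.length, S X l start acc) := by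
  fun_induction runsOf l with
  | case1 => intro start acc; simp [S]
  | case2 a l ih =>
      intro start acc
      rw [List.foldl_cons]
      have hstep : stepB X (start, acc) (a, runLen a l + 1)
          = (start + (runLen a l + 1), piece X start (runLen a l + 1) a acc) := by
        simp [stepB, piece]
      rw [hstep, ih, S]
      have := runLen_le a l
      refine Prod.ext ?_ rfl
      simp only [List.length_drop, List.length_cons]
      omega

-- ===== VERDICT (by name: the statement is the Claim_ definition above) =====
theorem folder_task_data_split_spec : Claim_equal_folder_task_data_split := by
  intro X y _ hpre
  unfold Spec_folder_task_data_split folder_task_data_split folder_task_data_split_alt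
  rw [runsB_eq, foldB_eq_S]
  by_cases hy : y.length = 0
  · rw [if_pos hy]
    rw [List.eq_nil_of_length_eq_zero hy]
    simp [S]
  · rw [if_neg hy]
    have hXy : y.length ≤ X.length := by
      rcases hpre with h | h
      · exact absurd (by simp [h]) hy
      · exact h
    have h01 : (1 : Nat) = 0 + 1 := rfl
    have hr : ([0] : List Nat) = List.range' 0 1 := rfl
    have hg0 : y.getD 0 "" = y.getD (0 : Nat) "" := rfl
    rw [hr, h01]
    rw [outer_eq_S X y hXy y.length 0 1 ([], [], [], []) (by omega) (by omega) (by omega) (by omega)]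
    simp
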